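-- pv_equiv track=rewrite | github.com/mishi5/mon | scenes/title_scene.py | _nth_valid
-- ===== SOURCE A (Python) =====
-- def _nth_valid(row: list, n: int) -> int:
--     """row の中で n 番目(0始まり)の非Noneのインデックスを返す。"""
--     count = 0
--     for i, c in enumerate(row):
--         if c is not None:
--             if count == n:
--                 return i
--             count += 1
--     return 0
-- ===== SOURCE B (Python) =====
-- def _nth_valid(row: list, n: int) -> int:
--     """row の中で n 番目(0始まり)の非Noneのインデックスを返す。"""
--     counts = []
--     t = 0
--     for c in row:
--         if c is not None:
--             t += 1
--         counts.append(t)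
--     if n < 0 or t <= n:
--         return 0
--     lo, hi = 0, len(counts)
--     while lo < hi:
--         mid = (lo + hi) // 2
--         if counts[mid] <= n:
--             lo = mid + 1
--         else:
--             hi = mid
--     return lo
-- ===== Notes on version B (the rewrite author's own statement) =====
-- stated objective: alternative
-- what changed: B builds a prefix-count array of non-None cells in one pass and then locates the nth valid index by a hand-written binary search for the first prefix count exceeding n, instead of A's interleaved count-and-early-return scan.
import Mathlib
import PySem

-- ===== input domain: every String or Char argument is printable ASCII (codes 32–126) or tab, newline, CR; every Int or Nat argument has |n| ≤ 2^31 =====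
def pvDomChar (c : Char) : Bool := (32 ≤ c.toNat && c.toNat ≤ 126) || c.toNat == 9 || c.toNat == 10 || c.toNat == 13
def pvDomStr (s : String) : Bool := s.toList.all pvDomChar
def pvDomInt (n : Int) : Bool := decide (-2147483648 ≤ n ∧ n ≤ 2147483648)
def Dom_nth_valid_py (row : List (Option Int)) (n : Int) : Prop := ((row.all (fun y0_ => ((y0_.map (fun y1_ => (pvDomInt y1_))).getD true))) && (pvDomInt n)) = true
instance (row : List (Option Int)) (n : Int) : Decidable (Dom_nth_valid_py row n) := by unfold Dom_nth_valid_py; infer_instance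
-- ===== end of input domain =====

-- B replaces A's interleaved count-and-early-return scan by a prefix-count array plus a
-- binary search for the first prefix count exceeding n (alternative algorithm, same result).

-- ===== PORT A =====
-- the for-loop of A: state = (index i of the current element, count of non-None seen so far)
def nthValidGo (n : Int) : List (Option Int) → Int → Int → Int
  | [], _, _ => 0
  | c :: rest, i, count =>
    match c with
    | some _ => if count = n then i else nthValidGo n rest (i + 1) (count + 1)
    | none => nthValidGo n rest (i + 1) count

def nth_valid_py (row : List (Option Int)) (n : Int) : Int :=
  nthValidGo n row 0 0

-- ===== PORT B =====
-- the first loop of Source B: builds (counts, t) where counts are running non-None prefix counts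
def pvBuild : List (Option Int) → Int → (List Int × Int)
  | [], t => ([], t)
  | c :: rest, t =>
    let t' := if c.isSome then t + 1 else t
    let p := pvBuild rest t'
    (t' :: p.1, p.2)

-- the while-loop of Source B: binary search for the first index with counts[i] > n
def pvBS (counts : List Int) (n : Int) (lo hi : Int) : Int :=
  if h : lo < hi then
    let mid := PySem.Int.floordiv (lo + hi) 2
    if (PySem.List.pyGet? counts mid).getD 0 ≤ n then pvBS counts n (mid + 1) hi
    else pvBS counts n lo mid
  else lo
termination_by (hi - lo).toNat
decreasing_by
  · have h1 := PySem.Int.floordiv_two_mid_bounds (lo := lo) (hi := hi) (by omega)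
    omega
  · have h1 := PySem.Int.floordiv_two_mid_bounds (lo := lo) (hi := hi) (by omega)
    have h2 : PySem.Int.floordiv (lo + hi) 2 < hi :=
      (PySem.Int.floordiv_lt_iff_lt_mul (by omega)).mpr (by omega)
    omega

def nth_valid_py_alt (row : List (Option Int)) (n : Int) : Int :=
  let p := pvBuild row 0
  if n < 0 ∨ p.2 ≤ n then 0
  else pvBS p.1 n 0 (p.1.length : Int)

-- ===== PRECONDITION & SPEC =====
def Spec_nth_valid_py (row : List (Option Int)) (n : Int) (out : Int) : Prop := out = nth_valid_py_alt row n
instance (row : List (Option Int)) (n : Int) (out : Int) : Decidable (Spec_nth_valid_py row n out) := by unfold Spec_nth_valid_py; infer_instance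

-- ===== CLAIM (what is proved, stated in full; the proofs are below) =====
def Claim_equal_nth_valid_py : Prop := ∀ (row : List (Option Int)) (n : Int), Dom_nth_valid_py row n → Spec_nth_valid_py row n (nth_valid_py row n)

-- ===== LEMMAS AND PROOFS =====

-- reference: the m-th element of a list of indices, 0 outside the range
def pvPick : List Int → Int → Int
  | [], _ => 0
  | x :: xs, m => if m = 0 then x else pvPick xs (m - 1)

def pvValids (row : List (Option Int)) (s : Int) : List Int :=
  (PySem.List.enumerate row s).filterMap (fun p => if p.2.isSome then some p.1 else none)

-- reference: first index i with n < counts[i] (length of counts if none), as a linear scan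
def pvFirst : List Int → Int → Int
  | [], _ => 0
  | c :: cs, n => if n < c then 0 else 1 + pvFirst cs n

lemma pvValids_nil (s : Int) : pvValids [] s = [] := by
  simp [pvValids, PySem.List.enumerate_nil]

lemma pvValids_cons (c : Option Int) (rest : List (Option Int)) (s : Int) :
    pvValids (c :: rest) s =
      (if c.isSome then [s] else []) ++ pvValids rest (s + 1) := by
  cases c <;> simp [pvValids, PySem.List.enumerate_cons]

lemma goA_eq_pick (row : List (Option Int)) (n s count : Int) :
    nthValidGo n row s count = pvPick (pvValids row s) (n - count) := by
  induction row generalizing s count with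
  | nil => simp [nthValidGo, pvValids_nil, pvPick]
  | cons c rest ih =>
    cases c with
    | none =>
      simp only [nthValidGo, pvValids_cons, Option.isSome_none]
      simpa using ih (s + 1) count
    | some v =>
      simp only [nthValidGo, pvValids_cons, Option.isSome_some, if_true,
        List.singleton_append, pvPick]
      by_cases h : count = n
      · rw [if_pos h, if_pos (by omega : n - count = 0)]
      · rw [if_neg h, if_neg (by omega : ¬ n - count = 0), ih (s + 1) (count + 1)]
        congr 1
        omega

lemma pvPick_out (vs : List Int) (m : Int) (h : ¬ (0 ≤ m ∧ m < (vs.length : Int))) :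
    pvPick vs m = 0 := by
  induction vs generalizing m with
  | nil => rfl
  | cons x xs ih =>
    have hm : ¬ m = 0 := by simp at h ⊢; omega
    rw [pvPick, if_neg hm, ih (m - 1) (by simp at h ⊢; omega)]

lemma pvBuild_total (row : List (Option Int)) (t0 s : Int) :
    (pvBuild row t0).2 = t0 + ((pvValids row s).length : Int) := by
  induction row generalizing t0 s with
  | nil => simp [pvBuild, pvValids_nil]
  | cons c rest ih =>
    cases c with
    | none =>
      have := ih t0 (s + 1)
      simp only [pvBuild, pvValids_cons]
      simp
      omega
    | some v =>
      have := ih (t0 + 1) (s + 1)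
      simp only [pvBuild, pvValids_cons]
      simp
      omega

lemma pvBuild_ge (row : List (Option Int)) (t0 : Int) (j : Nat)
    (hj : j < (pvBuild row t0).1.length) : t0 ≤ (pvBuild row t0).1.getD j 0 := by
  induction row generalizing t0 j with
  | nil => simp [pvBuild] at hj
  | cons c rest ih =>
    cases j with
    | zero => cases c <;> simp [pvBuild] <;> omega
    | succ k =>
      cases c with
      | none =>
        simp only [pvBuild, Option.isSome_some, Option.isSome_none, Bool.false_eq_true, reduceIte, List.getD_cons_succ, List.getD_cons_zero, List.length_cons] at hj ⊢
        exact ih t0 k (by omega)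
      | some v =>
        simp only [pvBuild, Option.isSome_some, Option.isSome_none, Bool.false_eq_true, reduceIte, List.getD_cons_succ, List.getD_cons_zero, List.length_cons] at hj ⊢
        have := ih (t0 + 1) k (by omega)
        omega

lemma pvBuild_mono (row : List (Option Int)) (t0 : Int) (i j : Nat)
    (hij : i ≤ j) (hj : j < (pvBuild row t0).1.length) :
    (pvBuild row t0).1.getD i 0 ≤ (pvBuild row t0).1.getD j 0 := by
  induction row generalizing t0 i j with
  | nil => simp [pvBuild] at hj
  | cons c rest ih =>
    cases j with
    | zero =>
      have : i = 0 := by omega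
      subst this; exact le_refl _
    | succ k =>
      cases i with
      | zero =>
        cases c with
        | none =>
          simp only [pvBuild, Option.isSome_some, Option.isSome_none, Bool.false_eq_true, reduceIte, List.getD_cons_succ, List.getD_cons_zero, List.length_cons] at hj ⊢
          have := pvBuild_ge rest t0 k (by omega)
          omega
        | some v =>
          simp only [pvBuild, Option.isSome_some, Option.isSome_none, Bool.false_eq_true, reduceIte, List.getD_cons_succ, List.getD_cons_zero, List.length_cons] at hj ⊢
          have := pvBuild_ge rest (t0 + 1) k (by omega)
          omega
      | succ i' =>
        cases c with
        | none =>
          simp only [pvBuild, Option.isSome_some, Option.isSome_none, Bool.false_eq_true, reduceIte, List.getD_cons_succ, List.getD_cons_zero, List.length_cons] at hj ⊢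
          exact ih t0 i' k (by omega) (by omega)
        | some v =>
          simp only [pvBuild, Option.isSome_some, Option.isSome_none, Bool.false_eq_true, reduceIte, List.getD_cons_succ, List.getD_cons_zero, List.length_cons] at hj ⊢
          exact ih (t0 + 1) i' k (by omega) (by omega)

lemma pick_eq_first (row : List (Option Int)) (t0 s m : Int)
    (h0 : 0 ≤ m) (h1 : m < ((pvValids row s).length : Int)) :
    pvPick (pvValids row s) m = s + pvFirst (pvBuild row t0).1 (t0 + m) := by
  induction row generalizing t0 s m with
  | nil => simp [pvValids_nil] at h1; omega
  | cons c rest ih =>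
    cases c with
    | none =>
      rw [pvValids_cons] at h1 ⊢
      simp only [Option.isSome_none, Bool.false_eq_true, if_false, List.nil_append] at h1 ⊢
      simp only [pvBuild, pvFirst, Option.isSome_none, Bool.false_eq_true, if_false]
      rw [if_neg (by omega)]
      have := ih t0 (s + 1) m h0 h1
      omega
    | some v =>
      rw [pvValids_cons] at h1 ⊢
      simp only [Option.isSome_some, if_true, List.singleton_append] at h1 ⊢
      simp only [pvBuild, pvFirst, Option.isSome_some, if_true]
      rw [pvPick]
      by_cases hm : m = 0
      · rw [if_pos hm, if_pos (by omega)]; omega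
      · have hlen : m - 1 < ((pvValids rest (s + 1)).length : Int) := by
          simp at h1; omega
        have := ih (t0 + 1) (s + 1) (m - 1) (by omega) hlen
        rw [if_neg hm, if_neg (by omega)]
        have e : t0 + 1 + (m - 1) = t0 + m := by omega
        rw [e] at this
        omega

lemma pvFirst_eq (counts : List Int) (n : Int) (k : Nat)
    (hk : k ≤ counts.length)
    (hlow : ∀ j : Nat, j < k → counts.getD j 0 ≤ n)
    (hhi : k < counts.length → n < counts.getD k 0) :
    pvFirst counts n = (k : Int) := by
  induction counts generalizing k with
  | nil => simp at hk; simp [pvFirst, hk]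
  | cons c cs ih =>
    cases k with
    | zero =>
      have := hhi (by simp)
      simp at this
      simp [pvFirst, this]
    | succ k' =>
      have hc : c ≤ n := by simpa using hlow 0 (by omega)
      rw [pvFirst, if_neg (by omega),
        ih k' (by simpa using hk) (fun j hj => by simpa using hlow (j + 1) (by omega))
          (fun h => by simpa using hhi (by simpa using h))]
      push_cast; ring

lemma pvBS_eq (counts : List Int) (n lo hi : Int)
    (hmono : ∀ i j : Nat, i ≤ j → j < counts.length → counts.getD i 0 ≤ counts.getD j 0)
    (hlo : 0 ≤ lo) (hlohi : lo ≤ hi) (hhi : hi ≤ (counts.length : Int))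
    (H1 : ∀ j : Nat, (j : Int) < lo → counts.getD j 0 ≤ n)
    (H2 : ∀ j : Nat, hi ≤ (j : Int) → j < counts.length → n < counts.getD j 0) :
    pvBS counts n lo hi = pvFirst counts n := by
  have key : ∀ fuel : Nat, ∀ lo hi : Int, (hi - lo).toNat ≤ fuel →
      0 ≤ lo → lo ≤ hi → hi ≤ (counts.length : Int) →
      (∀ j : Nat, (j : Int) < lo → counts.getD j 0 ≤ n) →
      (∀ j : Nat, hi ≤ (j : Int) → j < counts.length → n < counts.getD j 0) →
      pvBS counts n lo hi = pvFirst counts n := by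
    intro fuel
    induction fuel with
    | zero =>
      intro lo hi hf hlo hlohi hhi H1 H2
      rw [pvBS, dif_neg (by omega),
        pvFirst_eq counts n lo.toNat (by omega)
          (fun j hj => H1 j (by omega))
          (fun h => H2 lo.toNat (by omega) h)]
      omega
    | succ f ihf =>
      intro lo hi hf hlo hlohi hhi H1 H2
      by_cases h : lo < hi
      · rw [pvBS, dif_pos h]
        have hmid := PySem.Int.floordiv_two_mid_bounds (lo := lo) (hi := hi) (by omega)
        have hmid2 : PySem.Int.floordiv (lo + hi) 2 < hi :=
          (PySem.Int.floordiv_lt_iff_lt_mul (by omega)).mpr (by omega)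
        set mid := PySem.Int.floordiv (lo + hi) 2 with hm
        have hmnn : ((mid.toNat : Int)) = mid := by omega
        have hacc : (PySem.List.pyGet? counts mid).getD 0 = counts.getD mid.toNat 0 := by
          rw [PySem.List.pyGet?_of_nonneg counts (by omega)]
          simp [List.getD]
        have hmlen : mid.toNat < counts.length := by omega
        by_cases hc : (PySem.List.pyGet? counts mid).getD 0 ≤ n
        · rw [if_pos hc]
          rw [hacc] at hc
          refine ihf (mid + 1) hi (by omega) (by omega) (by omega) hhi ?_ H2
          intro j hj
          have hje : j ≤ mid.toNat := by omega
          have := hmono j mid.toNat hje hmlen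
          omega
        · rw [if_neg hc]
          rw [hacc] at hc
          refine ihf lo mid (by omega) hlo (by omega) (by omega) H1 ?_
          intro j hjm hj
          have := hmono mid.toNat j (by omega) hj
          omega
      · rw [pvBS, dif_neg h,
          pvFirst_eq counts n lo.toNat (by omega)
            (fun j hj => H1 j (by omega))
            (fun hlt => H2 lo.toNat (by omega) hlt)]
        omega
  exact key (hi - lo).toNat lo hi (le_refl _) hlo hlohi hhi H1 H2

-- ===== VERDICT (by name: the statement is the Claim_ definition above) =====
theorem nth_valid_py_spec : Claim_equal_nth_valid_py := by
  intro row n _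
  unfold Spec_nth_valid_py nth_valid_py nth_valid_py_alt
  rw [goA_eq_pick row n 0 0]
  have htot := pvBuild_total row 0 0
  by_cases hg : n < 0 ∨ (pvBuild row 0).2 ≤ n
  · simp only [if_pos hg]
    exact pvPick_out _ _ (by omega)
  · simp only [if_neg hg]
    rw [not_or, not_lt, not_le] at hg
    have hA := pick_eq_first row 0 0 n (by omega) (by omega)
    rw [show (0:Int) + n = n from by omega] at hA
    rw [show n - 0 = n by omega, hA,
      pvBS_eq (pvBuild row 0).1 n 0 ((pvBuild row 0).1.length : Int)
        (pvBuild_mono row 0) (le_refl _) (by omega) (le_refl _)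
        (fun j hj => by omega) (fun j hj hjl => by omega)]
    omega
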